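-- pv_equiv track=rewrite | github.com/timvieira/transduction | transduction/viz.py | _int_range_tokens
-- ===== SOURCE A (Python) =====
-- def _int_ranges(ints):
--     """Yield ``(lo, hi)`` pairs for runs of consecutive integers in *ints*."""
--     vals = sorted(ints)
--     if not vals:
--         return
--     start = prev = vals[0]
--     for k in vals[1:]:
--         if k != prev + 1:
--             yield start, prev
--             start = k
--         prev = k
--     yield start, prev
--
-- def _int_range_tokens(ints):
--     """Convert a set of integers into compact range tokens.
--
--     Runs of 3+ consecutive integers become ``a-b`` style ranges; shorter
--     runs are listed individually.
--     """
--     toks = []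
--     for a, b in _int_ranges(ints):
--         if b - a + 1 >= 3:
--             toks.append(f"{a}-{b}")
--         else:
--             for v in range(a, b + 1):
--                 toks.append(str(v))
--     return toks
-- ===== SOURCE B (Python) =====
-- def _int_range_tokens(ints):
--     """Convert a set of integers into compact range tokens.
--
--     Single right-to-left pass over the sorted values: runs are detected from
--     the high end, tokens are emitted back-to-front, and the token list is
--     reversed once at the end.
--     """
--     vals = sorted(ints)
--     if not vals:
--         return []
--     rtoks = []
--
--     def emit(lo, hi):
--         if hi - lo + 1 >= 3:
--             rtoks.append(f"{lo}-{hi}")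
--         else:
--             for v in range(hi, lo - 1, -1):
--                 rtoks.append(str(v))
--
--     lo = hi = vals[-1]
--     for k in reversed(vals[:-1]):
--         if k != lo - 1:
--             emit(lo, hi)
--             lo = hi = k
--         else:
--             lo = k
--     emit(lo, hi)
--     return rtoks[::-1]
-- ===== Notes on version B (the rewrite author's own statement) =====
-- stated objective: alternative
-- what changed: B scans the sorted values right-to-left with a (lo,hi) run state, emitting tokens back-to-front and reversing once at the end, instead of A's generator of (start,prev) runs consumed by a second left-to-right token loop.
import Mathlib
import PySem

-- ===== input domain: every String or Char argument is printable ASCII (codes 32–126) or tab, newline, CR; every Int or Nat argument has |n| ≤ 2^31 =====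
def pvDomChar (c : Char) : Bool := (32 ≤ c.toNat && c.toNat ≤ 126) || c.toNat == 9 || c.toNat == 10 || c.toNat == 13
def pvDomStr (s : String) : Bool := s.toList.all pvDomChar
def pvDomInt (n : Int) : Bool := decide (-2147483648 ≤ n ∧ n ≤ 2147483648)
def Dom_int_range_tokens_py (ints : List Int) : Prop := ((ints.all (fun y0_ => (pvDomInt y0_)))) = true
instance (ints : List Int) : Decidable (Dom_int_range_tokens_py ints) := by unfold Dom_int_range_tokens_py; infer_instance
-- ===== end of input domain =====

-- B replaces A's left-to-right generator-plus-token-loop by one right-to-left pass that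
-- emits tokens back-to-front and reverses once at the end (objective: alternative).

-- ===== PORT A =====
-- _int_ranges: the generator, transliterated as a function returning the yielded list;
-- the loop state is (start, prev, yielded-so-far)
def pyIntRangesGo : List Int → List (Int × Int)
  | [] => []
  | v0 :: rest =>
    let st := rest.foldl (fun (st : Int × Int × List (Int × Int)) k =>
        if k ≠ st.2.1 + 1 then (k, k, st.2.2 ++ [(st.1, st.2.1)]) else (st.1, k, st.2.2))
      (v0, v0, [])
    st.2.2 ++ [(st.1, st.2.1)]

def pyIntRanges (ints : List Int) : List (Int × Int) :=
  pyIntRangesGo (PySem.List.sorted ints (fun x => x) false)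

def int_range_tokens_py (ints : List Int) : List String :=
  (pyIntRanges ints).foldl (fun toks ab =>
    if 3 ≤ ab.2 - ab.1 + 1 then toks ++ [PySem.Int.toStr ab.1 ++ "-" ++ PySem.Int.toStr ab.2]
    else toks ++ (PySem.List.pyRange ab.1 (ab.2 + 1) 1).map PySem.Int.toStr) []

-- ===== PORT B =====
-- emit(lo, hi): the tokens of one run, back-to-front
def emitRev (lo hi : Int) : List String :=
  if 3 ≤ hi - lo + 1 then [PySem.Int.toStr lo ++ "-" ++ PySem.Int.toStr hi]
  else (PySem.List.pyRange hi (lo - 1) (-1)).map PySem.Int.toStr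

-- vals[-1] then the loop over reversed(vals[:-1]) = head and tail of vals.reverse;
-- the loop state is (lo, hi, rtoks); rtoks[::-1] is .reverse
def intRangeTokensRevGo : List Int → List String
  | [] => []
  | v0 :: rrest =>
    let st := rrest.foldl (fun (st : Int × Int × List String) k =>
        if k ≠ st.1 - 1 then (k, k, st.2.2 ++ emitRev st.1 st.2.1) else (k, st.2.1, st.2.2))
      (v0, v0, [])
    (st.2.2 ++ emitRev st.1 st.2.1).reverse

def int_range_tokens_py_alt (ints : List Int) : List String :=
  intRangeTokensRevGo (PySem.List.sorted ints (fun x => x) false).reverse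

-- ===== PRECONDITION & SPEC =====
def Spec_int_range_tokens_py (ints : List Int) (out : List String) : Prop := out = int_range_tokens_py_alt ints
instance (ints : List Int) (out : List String) : Decidable (Spec_int_range_tokens_py ints out) := by unfold Spec_int_range_tokens_py; infer_instance

-- ===== CLAIM (what is proved, stated in full; the proofs are below) =====
def Claim_equal_int_range_tokens_py : Prop := ∀ (ints : List Int), Dom_int_range_tokens_py ints → Spec_int_range_tokens_py ints (int_range_tokens_py ints)

-- ===== LEMMAS AND PROOFS =====

-- tokens of a single run, in A's (left-to-right) order
def tokOf (ab : Int × Int) : List String :=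
  if 3 ≤ ab.2 - ab.1 + 1 then [PySem.Int.toStr ab.1 ++ "-" ++ PySem.Int.toStr ab.2]
  else (PySem.List.pyRange ab.1 (ab.2 + 1) 1).map PySem.Int.toStr

-- emitRev, uncurried
def emitP (ab : Int × Int) : List String := emitRev ab.1 ab.2

-- A's run decomposition, left to right
def rangesL (s p : Int) : List Int → List (Int × Int)
  | [] => [(s, p)]
  | k :: l => if k ≠ p + 1 then (s, p) :: rangesL k k l else rangesL s k l

-- B's run decomposition, right to left
def rangesR (lo hi : Int) : List Int → List (Int × Int)
  | [] => [(lo, hi)]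
  | k :: l => if k ≠ lo - 1 then (lo, hi) :: rangesR k k l else rangesR k hi l

-- rangesL of (v :: l) followed by a final pending run [lo..hi]
def rangesE (s p : Int) (l : List Int) (lo hi : Int) : List (Int × Int) :=
  match l with
  | [] => if lo ≠ p + 1 then [(s, p), (lo, hi)] else [(s, hi)]
  | k :: l => if k ≠ p + 1 then (s, p) :: rangesE k k l lo hi else rangesE s k l lo hi

theorem rangesL_cons (s p k : Int) (l : List Int) :
    rangesL s p (k :: l) = if k ≠ p + 1 then (s, p) :: rangesL k k l else rangesL s k l := rfl

theorem rangesR_cons (lo hi k : Int) (l : List Int) :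
    rangesR lo hi (k :: l) = if k ≠ lo - 1 then (lo, hi) :: rangesR k k l else rangesR k hi l := rfl

theorem rangesE_cons (s p a : Int) (l : List Int) (lo hi : Int) :
    rangesE s p (a :: l) lo hi =
      if a ≠ p + 1 then (s, p) :: rangesE a a l lo hi else rangesE s a l lo hi := rfl

theorem emitP_eq (ab : Int × Int) : emitP ab = (tokOf ab).reverse := by
  obtain ⟨lo, hi⟩ := ab
  unfold emitP emitRev tokOf
  split
  · rfl
  · rw [show lo - 1 = (lo - 1 + 1) - 1 by ring]
    simp [PySem.List.pyRange_neg_one_eq_reverse]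

theorem foldA (l : List Int) : ∀ (s p : Int) (acc : List (Int × Int)),
    ((l.foldl (fun (st : Int × Int × List (Int × Int)) k =>
        if k ≠ st.2.1 + 1 then (k, k, st.2.2 ++ [(st.1, st.2.1)]) else (st.1, k, st.2.2))
      (s, p, acc)).2.2
     ++ [((l.foldl (fun (st : Int × Int × List (Int × Int)) k =>
        if k ≠ st.2.1 + 1 then (k, k, st.2.2 ++ [(st.1, st.2.1)]) else (st.1, k, st.2.2))
      (s, p, acc)).1,
          (l.foldl (fun (st : Int × Int × List (Int × Int)) k =>
        if k ≠ st.2.1 + 1 then (k, k, st.2.2 ++ [(st.1, st.2.1)]) else (st.1, k, st.2.2))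
      (s, p, acc)).2.1)]) = acc ++ rangesL s p l := by
  induction l with
  | nil => intro s p acc; simp [rangesL]
  | cons k l ih =>
    intro s p acc
    simp only [List.foldl_cons]
    rw [rangesL_cons]
    by_cases h : k = p + 1
    · rw [show (if k ≠ p + 1 then (k, k, acc ++ [(s, p)]) else (s, k, acc)) = (s, k, acc)
          from by rw [if_neg (by omega)]]
      rw [if_neg (by omega), ih]
    · rw [show (if k ≠ p + 1 then (k, k, acc ++ [(s, p)]) else (s, k, acc))
            = (k, k, acc ++ [(s, p)]) from by rw [if_pos (by omega)]]
      rw [if_pos (by omega), ih]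
      simp

theorem foldB (l : List Int) : ∀ (lo hi : Int) (acc : List String),
    ((l.foldl (fun (st : Int × Int × List String) k =>
        if k ≠ st.1 - 1 then (k, k, st.2.2 ++ emitRev st.1 st.2.1) else (k, st.2.1, st.2.2))
      (lo, hi, acc)).2.2
     ++ emitRev (l.foldl (fun (st : Int × Int × List String) k =>
        if k ≠ st.1 - 1 then (k, k, st.2.2 ++ emitRev st.1 st.2.1) else (k, st.2.1, st.2.2))
      (lo, hi, acc)).1
        ((l.foldl (fun (st : Int × Int × List String) k =>
        if k ≠ st.1 - 1 then (k, k, st.2.2 ++ emitRev st.1 st.2.1) else (k, st.2.1, st.2.2))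
      (lo, hi, acc)).2.1)) = acc ++ (rangesR lo hi l).flatMap emitP := by
  induction l with
  | nil => intro lo hi acc; simp [rangesR, emitP]
  | cons k l ih =>
    intro lo hi acc
    simp only [List.foldl_cons]
    rw [rangesR_cons]
    by_cases h : k = lo - 1
    · rw [show (if k ≠ lo - 1 then (k, k, acc ++ emitRev lo hi) else (k, hi, acc)) = (k, hi, acc)
          from by rw [if_neg (by omega)]]
      rw [if_neg (by omega), ih]
    · rw [show (if k ≠ lo - 1 then (k, k, acc ++ emitRev lo hi) else (k, hi, acc))
            = (k, k, acc ++ emitRev lo hi) from by rw [if_pos (by omega)]]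
      rw [if_pos (by omega), ih]
      simp [emitP]

theorem rangesE_snoc (m : List Int) : ∀ (s p k lo hi : Int),
    rangesE s p (m ++ [k]) lo hi =
      if lo ≠ k + 1 then rangesE s p m k k ++ [(lo, hi)] else rangesE s p m k hi := by
  induction m with
  | nil =>
    intro s p k lo hi
    by_cases h1 : k = p + 1 <;> by_cases h2 : lo = k + 1 <;>
      simp [rangesE, h1, h2]
  | cons a m ih =>
    intro s p k lo hi
    rw [List.cons_append, rangesE_cons, rangesE_cons, rangesE_cons]
    by_cases h : a = p + 1
    · have hna : ¬ a ≠ p + 1 := by omega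
      rw [if_neg hna, if_neg hna, if_neg hna, ih]
    · have hpa : a ≠ p + 1 := h
      rw [if_pos hpa, if_pos hpa, if_pos hpa, ih]
      by_cases h2 : lo = k + 1
      · have hn : ¬ lo ≠ k + 1 := by omega
        rw [if_neg hn, if_neg hn]
      · have hp : lo ≠ k + 1 := h2
        rw [if_pos hp, if_pos hp]
        simp

theorem rangesR_rev (rl : List Int) : ∀ (lo hi v : Int) (vs : List Int),
    rl.reverse = v :: vs → rangesR lo hi rl = (rangesE v v vs lo hi).reverse := by
  induction rl with
  | nil => intro lo hi v vs h; simp at h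
  | cons k rl ih =>
    intro lo hi v vs h
    cases hr : rl.reverse with
    | nil =>
      have hrl : rl = [] := by simpa using congrArg List.reverse hr
      subst hrl
      have h' : v :: vs = [k] := by rw [← h]; simp
      injection h' with h1 h2
      subst h1; subst h2
      by_cases h2 : lo = v + 1
      · rw [rangesR_cons, if_neg (show ¬ v ≠ lo - 1 by omega),
            show rangesE v v [] lo hi = [(v, hi)] from by
              unfold rangesE; rw [if_neg (show ¬ lo ≠ v + 1 by omega)]]
        rfl
      · rw [rangesR_cons, if_pos (show v ≠ lo - 1 by omega),
            show rangesE v v [] lo hi = [(v, v), (lo, hi)] from by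
              unfold rangesE; rw [if_pos (show lo ≠ v + 1 by omega)]]
        rfl
    | cons w ws =>
      have h3 : v :: vs = w :: (ws ++ [k]) := by rw [← h]; simp [hr]
      injection h3 with h4 h5
      have hr' : rl.reverse = v :: ws := by rw [hr, h4]
      rw [h5, rangesE_snoc, rangesR_cons]
      by_cases h2 : lo = k + 1
      · rw [if_neg (show ¬ k ≠ lo - 1 by omega), if_neg (show ¬ lo ≠ k + 1 by omega)]
        exact ih k hi v ws hr'
      · rw [if_pos (show k ≠ lo - 1 by omega), if_pos (show lo ≠ k + 1 by omega),
            ih k k v ws hr']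
        simp

theorem rangesE_run (vs : List Int) : ∀ (s p lo : Int),
    rangesE s p vs lo lo = rangesL s p (vs ++ [lo]) := by
  induction vs with
  | nil =>
    intro s p lo
    by_cases h : lo = p + 1 <;> simp [rangesE, rangesL, h]
  | cons k vs ih =>
    intro s p lo
    rw [List.cons_append, rangesE_cons, rangesL_cons]
    by_cases h : k = p + 1
    · rw [if_neg (by omega), if_neg (by omega), ih]
    · rw [if_pos (by omega), if_pos (by omega), ih]

theorem flatMap_emitP (rs : List (Int × Int)) :
    rs.flatMap emitP = (rs.reverse.flatMap tokOf).reverse := by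
  induction rs with
  | nil => simp
  | cons r rs ih => simp [ih, emitP_eq]

theorem foldTok (rs : List (Int × Int)) : ∀ (acc : List String),
    rs.foldl (fun toks ab =>
      if 3 ≤ ab.2 - ab.1 + 1 then toks ++ [PySem.Int.toStr ab.1 ++ "-" ++ PySem.Int.toStr ab.2]
      else toks ++ (PySem.List.pyRange ab.1 (ab.2 + 1) 1).map PySem.Int.toStr) acc
    = acc ++ rs.flatMap tokOf := by
  induction rs with
  | nil => intro acc; simp
  | cons r rs ih =>
    intro acc
    simp only [List.foldl_cons]
    rw [show (if 3 ≤ r.2 - r.1 + 1 then acc ++ [PySem.Int.toStr r.1 ++ "-" ++ PySem.Int.toStr r.2]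
        else acc ++ (PySem.List.pyRange r.1 (r.2 + 1) 1).map PySem.Int.toStr) = acc ++ tokOf r
      from by unfold tokOf; split <;> rfl]
    rw [ih]
    simp

-- ===== VERDICT (by name: the statement is the Claim_ definition above) =====
theorem int_range_tokens_py_spec : Claim_equal_int_range_tokens_py := by
  intro ints _
  unfold Spec_int_range_tokens_py
  cases hv : PySem.List.sorted ints (fun x => x) false with
  | nil =>
    unfold int_range_tokens_py int_range_tokens_py_alt pyIntRanges
    rw [hv]
    rfl
  | cons v rest =>
    obtain ⟨v0, rrest, hr⟩ : ∃ v0 rrest,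
        (PySem.List.sorted ints (fun x => x) false).reverse = v0 :: rrest := by
      cases h : (PySem.List.sorted ints (fun x => x) false).reverse with
      | nil => rw [hv] at h; simp at h
      | cons a l => exact ⟨a, l, rfl⟩
    have hA : int_range_tokens_py ints = (rangesL v v rest).flatMap tokOf := by
      unfold int_range_tokens_py pyIntRanges
      rw [hv]
      simp only [pyIntRangesGo]
      rw [foldTok, foldA]
      simp
    have hB : int_range_tokens_py_alt ints
        = ((rangesR v0 v0 rrest).flatMap emitP).reverse := by
      unfold int_range_tokens_py_alt
      rw [hr]
      simp only [intRangeTokensRevGo]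
      rw [foldB]
      simp
    have hcore : (rangesR v0 v0 rrest).reverse = rangesL v v rest := by
      have hvals : v :: rest = rrest.reverse ++ [v0] := by
        have h2 := congrArg List.reverse hr
        simpa [hv] using h2
      cases hrr : rrest.reverse with
      | nil =>
        have hrrest : rrest = [] := by simpa using congrArg List.reverse hrr
        rw [hrr] at hvals
        have hvals' : v :: rest = [v0] := by simpa using hvals
        injection hvals' with h1 h2
        subst h1; subst h2; subst hrrest
        rfl
      | cons w ws =>
        rw [hrr] at hvals
        have hvals' : v :: rest = w :: (ws ++ [v0]) := by simpa using hvals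
        injection hvals' with h1 h2
        have hrr' : rrest.reverse = v :: ws := by rw [hrr, h1]
        subst h2
        rw [rangesR_rev rrest v0 v0 v ws hrr', List.reverse_reverse, rangesE_run]
    rw [hA, hB, flatMap_emitP, List.reverse_reverse, hcore]
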